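-- pv_equiv track=rewrite | github.com/Redanaz/omr-evaluation-system | omr.py | calculate_subject_scores
-- ===== SOURCE A (Python) =====
-- from typing import Dict, List, Tuple, Optional
--
-- SUBJECTS = {
--     "PYTHON": list(range(1, 21)),          # Questions 1-20
--     "DATA ANALYSIS": list(range(21, 41)),  # Questions 21-40
--     "MySQL": list(range(41, 61)),          # Questions 41-60
--     "POWER BI": list(range(61, 81)),       # Questions 61-80
--     "Adv STATS": list(range(81, 101))      # Questions 81-100
-- }
--
-- def calculate_subject_scores(answers: Dict, results: List) -> Dict[str, int]:
--     """Calculate scores for each subject"""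
--     subject_scores = {subject: 0 for subject in SUBJECTS.keys()}
--
--     for question_num, answer, correct_answer, is_correct in results:
--         if is_correct:
--             for subject, question_range in SUBJECTS.items():
--                 if question_num in question_range:
--                     subject_scores[subject] += 1
--                     break
--
--     return subject_scores
-- ===== SOURCE B (Python) =====
-- SUBJECT_NAMES = ["PYTHON", "DATA ANALYSIS", "MySQL", "POWER BI", "Adv STATS"]
--
-- def calculate_subject_scores(answers, results):
--     """Calculate scores for each subject (arithmetic question->subject mapping, no inner scan)"""
--     subject_scores = {name: 0 for name in SUBJECT_NAMES}
--     for question_num, answer, correct_answer, is_correct in results: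
--         if is_correct and 1 <= question_num <= 100:
--             subject_scores[SUBJECT_NAMES[(question_num - 1) // 20]] += 1
--     return subject_scores
-- ===== Notes on version B (the rewrite author's own statement) =====
-- stated objective: simpler
-- what changed: Replaced the inner per-subject membership scan over the five 20-element question ranges with a direct arithmetic mapping (question_num-1)//20 into a list of subject names, guarded by 1 <= question_num <= 100.
import Mathlib
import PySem

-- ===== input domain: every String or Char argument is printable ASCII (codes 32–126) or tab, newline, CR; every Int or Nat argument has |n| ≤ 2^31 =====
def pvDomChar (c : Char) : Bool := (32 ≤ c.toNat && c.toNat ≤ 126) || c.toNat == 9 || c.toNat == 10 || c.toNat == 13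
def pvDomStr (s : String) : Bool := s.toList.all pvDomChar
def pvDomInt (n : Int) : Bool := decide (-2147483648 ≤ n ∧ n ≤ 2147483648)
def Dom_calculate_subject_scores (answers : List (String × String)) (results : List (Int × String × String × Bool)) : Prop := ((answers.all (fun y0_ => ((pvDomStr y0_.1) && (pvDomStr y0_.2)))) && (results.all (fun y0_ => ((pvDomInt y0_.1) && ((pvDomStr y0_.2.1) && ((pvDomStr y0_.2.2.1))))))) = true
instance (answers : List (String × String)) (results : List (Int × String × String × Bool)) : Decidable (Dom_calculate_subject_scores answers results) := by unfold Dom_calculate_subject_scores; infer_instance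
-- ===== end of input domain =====

-- B replaces A's inner per-subject range scan by an arithmetic (q-1)//20 index into a name list; objective: simpler.

-- ===== PORT A =====
-- module constant SUBJECTS
def pySUBJECTS : List (String × List Int) :=
  [("PYTHON", PySem.List.pyRange 1 21 1),
   ("DATA ANALYSIS", PySem.List.pyRange 21 41 1),
   ("MySQL", PySem.List.pyRange 41 61 1),
   ("POWER BI", PySem.List.pyRange 61 81 1),
   ("Adv STATS", PySem.List.pyRange 81 101 1)]

-- the inner 'for subject, question_range in SUBJECTS.items(): … break'
def aInner (q : Int) (items : List (String × List Int)) (d : PySem.Dict String Int) : PySem.Dict String Int :=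
  match items with
  | [] => d
  | (s, rng) :: rest => if q ∈ rng then d.insert s (d.getD s 0 + 1) else aInner q rest d

def calculate_subject_scores (answers : List (String × String)) (results : List (Int × String × String × Bool)) : List (String × Int) :=
  let subject_scores := pySUBJECTS.foldl (fun d p => d.insert p.1 0) PySem.Dict.empty
  (results.foldl (fun d r => if r.2.2.2 then aInner r.1 pySUBJECTS d else d) subject_scores).items

-- ===== PORT B =====
def pySUBJECT_NAMES : List String := ["PYTHON", "DATA ANALYSIS", "MySQL", "POWER BI", "Adv STATS"]

def calculate_subject_scores_alt (answers : List (String × String)) (results : List (Int × String × String × Bool)) : List (String × Int) :=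
  let subject_scores := pySUBJECT_NAMES.foldl (fun d n => d.insert n 0) PySem.Dict.empty
  (results.foldl (fun d r =>
      if r.2.2.2 && decide (1 ≤ r.1) && decide (r.1 ≤ 100) then
        let s := (PySem.List.pyGet? pySUBJECT_NAMES (PySem.Int.floordiv (r.1 - 1) 20)).getD ""
        d.insert s (d.getD s 0 + 1)
      else d) subject_scores).items

-- ===== PRECONDITION & SPEC =====
def Spec_calculate_subject_scores (answers : List (String × String)) (results : List (Int × String × String × Bool)) (out : List (String × Int)) : Prop := out = calculate_subject_scores_alt answers results
instance (answers : List (String × String)) (results : List (Int × String × String × Bool)) (out : List (String × Int)) : Decidable (Spec_calculate_subject_scores answers results out) := by unfold Spec_calculate_subject_scores; infer_instance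

-- ===== CLAIM (what is proved, stated in full; the proofs are below) =====
def Claim_equal_calculate_subject_scores : Prop := ∀ (answers : List (String × String)) (results : List (Int × String × String × Bool)), Dom_calculate_subject_scores answers results → Spec_calculate_subject_scores answers results (calculate_subject_scores answers results)

-- ===== LEMMAS AND PROOFS =====

-- the two per-result step functions agree on every dict and result tuple
theorem step_eq (d : PySem.Dict String Int) (r : Int × String × String × Bool) :
    (if r.2.2.2 then aInner r.1 pySUBJECTS d else d) =
    (if r.2.2.2 && decide (1 ≤ r.1) && decide (r.1 ≤ 100) then
        let s := (PySem.List.pyGet? pySUBJECT_NAMES (PySem.Int.floordiv (r.1 - 1) 20)).getD ""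
        d.insert s (d.getD s 0 + 1)
      else d) := by
  obtain ⟨q, a, c, ok⟩ := r
  cases ok with
  | false => simp
  | true =>
    simp only [Bool.true_and]
    by_cases h1 : 1 ≤ q ∧ q ≤ 100
    · obtain ⟨hl, hr⟩ := h1
      simp only [hl, hr, decide_true, Bool.and_self, if_true]
      -- split into the five subject bands
      rcases (by omega : (1 ≤ q ∧ q < 21) ∨ (21 ≤ q ∧ q < 41) ∨ (41 ≤ q ∧ q < 61) ∨
          (61 ≤ q ∧ q < 81) ∨ (81 ≤ q ∧ q < 101)) with h | h | h | h | h
      · have hi : PySem.Int.floordiv (q - 1) 20 = 0 := by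
          rw [PySem.Int.floordiv_eq_iff_of_pos (by norm_num)]; omega
        simp only [hi]
        simp [aInner, pySUBJECTS, pySUBJECT_NAMES, PySem.List.mem_pyRange_one,
          PySem.List.pyGet?, PySem.List.pyIdx?, h.1, h.2]
      · have hi : PySem.Int.floordiv (q - 1) 20 = 1 := by
          rw [PySem.Int.floordiv_eq_iff_of_pos (by norm_num)]; omega
        simp only [hi]
        simp [aInner, pySUBJECTS, pySUBJECT_NAMES, PySem.List.mem_pyRange_one,
          PySem.List.pyGet?, PySem.List.pyIdx?, h.1, h.2]
      · have hi : PySem.Int.floordiv (q - 1) 20 = 2 := by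
          rw [PySem.Int.floordiv_eq_iff_of_pos (by norm_num)]; omega
        simp only [hi]
        simp [aInner, pySUBJECTS, pySUBJECT_NAMES, PySem.List.mem_pyRange_one,
          PySem.List.pyGet?, PySem.List.pyIdx?, h.1, h.2]
        split_ifs <;> first | rfl | omega
      · have hi : PySem.Int.floordiv (q - 1) 20 = 3 := by
          rw [PySem.Int.floordiv_eq_iff_of_pos (by norm_num)]; omega
        simp only [hi]
        simp [aInner, pySUBJECTS, pySUBJECT_NAMES, PySem.List.mem_pyRange_one,
          PySem.List.pyGet?, PySem.List.pyIdx?, h.1, h.2]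
        split_ifs <;> first | rfl | omega
      · have hi : PySem.Int.floordiv (q - 1) 20 = 4 := by
          rw [PySem.Int.floordiv_eq_iff_of_pos (by norm_num)]; omega
        simp only [hi]
        simp [aInner, pySUBJECTS, pySUBJECT_NAMES, PySem.List.mem_pyRange_one,
          PySem.List.pyGet?, PySem.List.pyIdx?, h.1, h.2]
        split_ifs <;> first | rfl | omega
    · -- question number outside 1..100: A's scan finds nothing, B's guard fails
      have hb : (decide (1 ≤ q) && decide (q ≤ 100)) = false := by
        simp only [Bool.and_eq_false_iff, decide_eq_false_iff_not]; omega
      simp only [hb]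
      simp [aInner, pySUBJECTS, PySem.List.mem_pyRange_one]
      split_ifs <;> first | rfl | omega

-- ===== VERDICT (by name: the statement is the Claim_ definition above) =====
theorem calculate_subject_scores_spec : Claim_equal_calculate_subject_scores := by
  intro answers results _
  unfold Spec_calculate_subject_scores calculate_subject_scores calculate_subject_scores_alt
  have hinit : pySUBJECTS.foldl (fun d p => d.insert p.1 0) (PySem.Dict.empty : PySem.Dict String Int) =
      pySUBJECT_NAMES.foldl (fun d n => d.insert n 0) (PySem.Dict.empty : PySem.Dict String Int) := by decide
  dsimp only
  rw [hinit]
  congr 1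
  apply List.foldl_ext
  intro d r _
  exact step_eq d r
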